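-- pv_equiv track=rewrite | github.com/carl24tech/Supabase-Scanner | scanner/cli.py | normalize_module_name
-- ===== SOURCE A (Python) =====
-- AVAILABLE_MODULES = [
--     "jwt",
--     "headers",
--     "tables",
--     "rpc",
--     "bruteforce",
--     "injection",
--     "mass_assignment",
--     "rls",
--     "idor",
--     "storage",
--     "auth",
--     "magic_link",
--     "edges",
--     "realtime",
--     "graphql",
--     "infra",
--     "files",
-- ]
--
-- MODULE_ALIASES = {
--     "auth": ["authentication", "email_enumeration"],
--     "bruteforce": ["brute", "table_brute"],
--     "edges": ["edge_functions", "functions"],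
--     "infra": ["infrastructure", "tls"],
-- }
--
-- def normalize_module_name(name: str) -> str:
--     name_lower = name.lower().strip()
--     for canonical, aliases in MODULE_ALIASES.items():
--         if name_lower == canonical or name_lower in aliases:
--             return canonical
--     if name_lower in AVAILABLE_MODULES:
--         return name_lower
--     return None
-- ===== SOURCE B (Python) =====
-- AVAILABLE_MODULES = [
--     "jwt",
--     "headers",
--     "tables",
--     "rpc",
--     "bruteforce",
--     "injection",
--     "mass_assignment",
--     "rls",
--     "idor",
--     "storage",
--     "auth",
--     "magic_link",
--     "edges",
--     "realtime",
--     "graphql",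
--     "infra",
--     "files",
-- ]
--
-- MODULE_ALIASES = {
--     "auth": ["authentication", "email_enumeration"],
--     "bruteforce": ["brute", "table_brute"],
--     "edges": ["edge_functions", "functions"],
--     "infra": ["infrastructure", "tls"],
-- }
--
-- # Reverse-lookup table built once: module -> itself, canonical -> itself, alias -> canonical.
-- _LOOKUP = {m: m for m in AVAILABLE_MODULES}
-- for _canon, _aliases in MODULE_ALIASES.items():
--     _LOOKUP[_canon] = _canon
--     for _a in _aliases:
--         _LOOKUP[_a] = _canon
--
-- def normalize_module_name(name: str) -> str:
--     return _LOOKUP.get(name.lower().strip())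
-- ===== Notes on version B (the rewrite author's own statement) =====
-- stated objective: idiomatic
-- what changed: A's per-call scan over MODULE_ALIASES (with a membership fallback over AVAILABLE_MODULES) is replaced by a module-level reverse-lookup dict built once (alias->canonical, canonical->itself, module->itself) and a single dict.get.
import Mathlib
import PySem

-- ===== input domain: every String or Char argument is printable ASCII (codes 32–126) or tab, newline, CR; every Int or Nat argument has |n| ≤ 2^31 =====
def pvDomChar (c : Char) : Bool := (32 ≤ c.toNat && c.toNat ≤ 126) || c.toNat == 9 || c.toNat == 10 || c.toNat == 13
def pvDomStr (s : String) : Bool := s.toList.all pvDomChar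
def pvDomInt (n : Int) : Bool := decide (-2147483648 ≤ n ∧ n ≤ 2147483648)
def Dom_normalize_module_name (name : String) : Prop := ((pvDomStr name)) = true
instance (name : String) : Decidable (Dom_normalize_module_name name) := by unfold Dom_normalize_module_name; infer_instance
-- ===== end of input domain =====

-- B replaces A's per-call scan over MODULE_ALIASES plus the AVAILABLE_MODULES membership fallback
-- by a reverse-lookup dict built once and a single dict.get (idiomatic; same return value everywhere).

-- ===== PORT A =====
def pvAvailableModules : List String :=
  ["jwt","headers","tables","rpc","bruteforce","injection","mass_assignment","rls","idor",
   "storage","auth","magic_link","edges","realtime","graphql","infra","files"]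

def pvModuleAliases : List (String × List String) :=
  [("auth", ["authentication","email_enumeration"]),
   ("bruteforce", ["brute","table_brute"]),
   ("edges", ["edge_functions","functions"]),
   ("infra", ["infrastructure","tls"])]

-- A's 'for canonical, aliases in MODULE_ALIASES.items()' loop with its early return
def pvLoopA (nl : String) : List (String × List String) → Option String
  | [] => none
  | (canonical, aliases) :: rest =>
      if nl == canonical || aliases.contains nl then some canonical else pvLoopA nl rest

def normalize_module_name (name : String) : Option String :=
  let name_lower := PySem.Str.strip (PySem.Str.lower name)
  match pvLoopA name_lower pvModuleAliases with
  | some canonical => some canonical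
  | none => if pvAvailableModules.contains name_lower then some name_lower else none

-- ===== PORT B =====
-- Source B's _LOOKUP: module -> itself, then canonical -> itself and alias -> canonical
def pvLookup : PySem.Dict String String :=
  let d := pvAvailableModules.foldl (fun d m => d.insert m m) PySem.Dict.empty
  pvModuleAliases.foldl (fun d p =>
    let d := d.insert p.1 p.1
    p.2.foldl (fun d a => d.insert a p.1) d) d

def normalize_module_name_alt (name : String) : Option String :=
  pvLookup.get? (PySem.Str.strip (PySem.Str.lower name))

-- ===== PRECONDITION & SPEC =====
def Spec_normalize_module_name (name : String) (out : Option String) : Prop := out = normalize_module_name_alt name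
instance (name : String) (out : Option String) : Decidable (Spec_normalize_module_name name out) := by unfold Spec_normalize_module_name; infer_instance

-- ===== CLAIM (what is proved, stated in full; the proofs are below) =====
def Claim_equal_normalize_module_name : Prop := ∀ (name : String), Dom_normalize_module_name name → Spec_normalize_module_name name (normalize_module_name name)

-- ===== LEMMAS AND PROOFS =====

-- the lookup table Source B builds, as a literal
set_option maxHeartbeats 2000000 in
theorem pvLookup_eq : pvLookup = PySem.Dict.mk
    [("jwt","jwt"),("headers","headers"),("tables","tables"),("rpc","rpc"),
     ("bruteforce","bruteforce"),("injection","injection"),("mass_assignment","mass_assignment"),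
     ("rls","rls"),("idor","idor"),("storage","storage"),("auth","auth"),
     ("magic_link","magic_link"),("edges","edges"),("realtime","realtime"),("graphql","graphql"),
     ("infra","infra"),("files","files"),
     ("authentication","auth"),("email_enumeration","auth"),
     ("brute","bruteforce"),("table_brute","bruteforce"),
     ("edge_functions","edges"),("functions","edges"),
     ("infrastructure","infra"),("tls","infra")] := by
  decide

-- A's loop + fallback agree with the single lookup on every lowered/stripped string
set_option maxHeartbeats 4000000 in
theorem pvCore (s : String) :
    (match pvLoopA s pvModuleAliases with
     | some canonical => some canonical
     | none => if pvAvailableModules.contains s then some s else none)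
      = pvLookup.get? s := by
  rw [pvLookup_eq]
  by_cases h0 : s = "jwt"
  · subst h0; decide
  by_cases h1 : s = "headers"
  · subst h1; decide
  by_cases h2 : s = "tables"
  · subst h2; decide
  by_cases h3 : s = "rpc"
  · subst h3; decide
  by_cases h4 : s = "bruteforce"
  · subst h4; decide
  by_cases h5 : s = "injection"
  · subst h5; decide
  by_cases h6 : s = "mass_assignment"
  · subst h6; decide
  by_cases h7 : s = "rls"
  · subst h7; decide
  by_cases h8 : s = "idor"
  · subst h8; decide
  by_cases h9 : s = "storage"
  · subst h9; decide
  by_cases h10 : s = "auth"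
  · subst h10; decide
  by_cases h11 : s = "magic_link"
  · subst h11; decide
  by_cases h12 : s = "edges"
  · subst h12; decide
  by_cases h13 : s = "realtime"
  · subst h13; decide
  by_cases h14 : s = "graphql"
  · subst h14; decide
  by_cases h15 : s = "infra"
  · subst h15; decide
  by_cases h16 : s = "files"
  · subst h16; decide
  by_cases h17 : s = "authentication"
  · subst h17; decide
  by_cases h18 : s = "email_enumeration"
  · subst h18; decide
  by_cases h19 : s = "brute"
  · subst h19; decide
  by_cases h20 : s = "table_brute"
  · subst h20; decide
  by_cases h21 : s = "edge_functions"
  · subst h21; decide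
  by_cases h22 : s = "functions"
  · subst h22; decide
  by_cases h23 : s = "infrastructure"
  · subst h23; decide
  by_cases h24 : s = "tls"
  · subst h24; decide
  have c0 : ("jwt" == s) = false := beq_eq_false_iff_ne.mpr fun h => h0 h.symm
  have c1 : ("headers" == s) = false := beq_eq_false_iff_ne.mpr fun h => h1 h.symm
  have c2 : ("tables" == s) = false := beq_eq_false_iff_ne.mpr fun h => h2 h.symm
  have c3 : ("rpc" == s) = false := beq_eq_false_iff_ne.mpr fun h => h3 h.symm
  have c4 : ("bruteforce" == s) = false := beq_eq_false_iff_ne.mpr fun h => h4 h.symm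
  have c5 : ("injection" == s) = false := beq_eq_false_iff_ne.mpr fun h => h5 h.symm
  have c6 : ("mass_assignment" == s) = false := beq_eq_false_iff_ne.mpr fun h => h6 h.symm
  have c7 : ("rls" == s) = false := beq_eq_false_iff_ne.mpr fun h => h7 h.symm
  have c8 : ("idor" == s) = false := beq_eq_false_iff_ne.mpr fun h => h8 h.symm
  have c9 : ("storage" == s) = false := beq_eq_false_iff_ne.mpr fun h => h9 h.symm
  have c10 : ("auth" == s) = false := beq_eq_false_iff_ne.mpr fun h => h10 h.symm
  have c11 : ("magic_link" == s) = false := beq_eq_false_iff_ne.mpr fun h => h11 h.symm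
  have c12 : ("edges" == s) = false := beq_eq_false_iff_ne.mpr fun h => h12 h.symm
  have c13 : ("realtime" == s) = false := beq_eq_false_iff_ne.mpr fun h => h13 h.symm
  have c14 : ("graphql" == s) = false := beq_eq_false_iff_ne.mpr fun h => h14 h.symm
  have c15 : ("infra" == s) = false := beq_eq_false_iff_ne.mpr fun h => h15 h.symm
  have c16 : ("files" == s) = false := beq_eq_false_iff_ne.mpr fun h => h16 h.symm
  have c17 : ("authentication" == s) = false := beq_eq_false_iff_ne.mpr fun h => h17 h.symm
  have c18 : ("email_enumeration" == s) = false := beq_eq_false_iff_ne.mpr fun h => h18 h.symm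
  have c19 : ("brute" == s) = false := beq_eq_false_iff_ne.mpr fun h => h19 h.symm
  have c20 : ("table_brute" == s) = false := beq_eq_false_iff_ne.mpr fun h => h20 h.symm
  have c21 : ("edge_functions" == s) = false := beq_eq_false_iff_ne.mpr fun h => h21 h.symm
  have c22 : ("functions" == s) = false := beq_eq_false_iff_ne.mpr fun h => h22 h.symm
  have c23 : ("infrastructure" == s) = false := beq_eq_false_iff_ne.mpr fun h => h23 h.symm
  have c24 : ("tls" == s) = false := beq_eq_false_iff_ne.mpr fun h => h24 h.symm
  simp [pvLoopA, pvModuleAliases, pvAvailableModules, PySem.Dict.get?,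
    h0, h1, h2, h3, h4, h5, h6, h7, h8, h9, h10, h11, h12, h13, h14, h15, h16, h17, h18, h19, h20, h21, h22, h23, h24,
    c0, c1, c2, c3, c4, c5, c6, c7, c8, c9, c10, c11, c12, c13, c14, c15, c16, c17, c18, c19, c20, c21, c22, c23, c24]

-- ===== VERDICT (by name: the statement is the Claim_ definition above) =====
set_option maxHeartbeats 2000000 in
theorem normalize_module_name_spec : Claim_equal_normalize_module_name := by
  intro name _
  unfold Spec_normalize_module_name normalize_module_name normalize_module_name_alt
  exact pvCore _
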